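-- pv_equiv track=rewrite | github.com/Pythrix/FOODCOP | MILPCoreFunc.py | orphanremover
-- ===== SOURCE A (Python) =====
-- def orphanremover(listofelements: list):
--     '''Generic function that return a balanced bracketed list
--     from an unbalanced one. Here Function track only bad closing bracket.
--     It was designed for the addscategoryextract function'''
--     newlist=listofelements
--     opening=[]
--     badpos=[]
--     for rk,el in enumerate(newlist):
--         if el == '(':
--             opening.append(rk)
--         elif el == ')':
--             if len(opening) == 0:
--                 badpos.append(rk)
--             else:
--                 opening.pop()
--
--     for ix,rk in enumerate(badpos):
--         newlist.pop(rk-ix)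
--     #return badpos
--     return newlist
-- ===== SOURCE B (Python) =====
-- def orphanremover(listofelements: list):
--     '''Single pass: keep every element except closing brackets that have no
--     matching open bracket; a depth counter replaces the index bookkeeping.
--     (Returns a new list; does not mutate the argument like A does.)'''
--     out = []
--     depth = 0
--     for el in listofelements:
--         if el == ')':
--             if depth == 0:
--                 continue
--             depth -= 1
--         elif el == '(':
--             depth += 1
--         out.append(el)
--     return out
-- ===== Notes on version B (the rewrite author's own statement) =====
-- stated objective: simpler
-- what changed: Replaces the two-pass index-tracking algorithm (record unmatched-close indices, then remove each with list.pop) by a single pass with a depth counter that emits kept elements directly.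
import Mathlib
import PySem

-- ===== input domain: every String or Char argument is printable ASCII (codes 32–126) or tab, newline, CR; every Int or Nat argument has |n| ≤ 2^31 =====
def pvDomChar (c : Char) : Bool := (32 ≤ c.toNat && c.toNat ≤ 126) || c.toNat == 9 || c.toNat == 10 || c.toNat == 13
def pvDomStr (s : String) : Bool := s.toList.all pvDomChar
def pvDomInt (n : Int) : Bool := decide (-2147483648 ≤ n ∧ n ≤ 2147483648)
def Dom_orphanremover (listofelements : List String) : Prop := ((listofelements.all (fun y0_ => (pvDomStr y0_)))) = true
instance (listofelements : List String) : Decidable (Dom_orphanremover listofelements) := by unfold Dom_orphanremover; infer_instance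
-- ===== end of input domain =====

-- B replaces A's two-pass index bookkeeping (collect bad indices, then list.pop each) by a
-- single pass with a depth counter (simpler). NOTE: Python A mutates its argument in place
-- (pops from the aliased input list); B does not — the equivalence proved here is about the
-- return value only.

-- ===== PORT A =====
-- first loop body: track indices of '(' in `opening`, unmatched ')' indices in `badpos`
def pvStepA (s : List Int × List Int) (p : Int × String) : List Int × List Int :=
  if p.2 == "(" then (s.1 ++ [p.1], s.2)
  else if p.2 == ")" then
    (if s.1.length == 0 then (s.1, s.2 ++ [p.1]) else (s.1.dropLast, s.2))
  else s

-- second loop body: newlist.pop(rk - ix); the index is always in range here (badpos is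
-- strictly increasing, proved below), so the `none` fallback is unreachable totalization
def pvPopStep (cur : List String) (p : Int × Int) : List String :=
  match PySem.List.pop? cur (p.2 - p.1) with
  | some r => r.2
  | none => cur

def orphanremover (listofelements : List String) : List String :=
  let st := (PySem.List.enumerate listofelements).foldl pvStepA ([], [])
  (PySem.List.enumerate st.2).foldl pvPopStep listofelements

-- ===== PORT B =====
-- one pass, depth counter; drop a ')' exactly when depth is 0
def pvGo : List String → Int → List String
  | [], _ => []
  | x :: xs, d =>
    if x == ")" then (if d == 0 then pvGo xs d else x :: pvGo xs (d - 1))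
    else if x == "(" then x :: pvGo xs (d + 1)
    else x :: pvGo xs d

def orphanremover_alt (listofelements : List String) : List String :=
  pvGo listofelements 0

-- ===== PRECONDITION & SPEC =====
def Spec_orphanremover (listofelements : List String) (out : List String) : Prop := out = orphanremover_alt listofelements
instance (listofelements : List String) (out : List String) : Decidable (Spec_orphanremover listofelements out) := by unfold Spec_orphanremover; infer_instance

-- ===== CLAIM (what is proved, stated in full; the proofs are below) =====
def Claim_equal_orphanremover : Prop := ∀ (listofelements : List String), Dom_orphanremover listofelements → Spec_orphanremover listofelements (orphanremover listofelements)

-- ===== LEMMAS AND PROOFS =====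

-- the list of unmatched-')' indices of l, starting at index n with d open brackets pending
def pvBad : List String → Int → Int → List Int
  | [], _, _ => []
  | x :: xs, n, d =>
    if x == ")" then (if d == 0 then n :: pvBad xs (n+1) 0 else pvBad xs (n+1) (d-1))
    else if x == "(" then pvBad xs (n+1) (d+1)
    else pvBad xs (n+1) d

-- keep the elements of l (indexed from n) whose index is not in bs
def pvK : List String → Int → List Int → List String
  | [], _, _ => []
  | x :: xs, n, bs => if n ∈ bs then pvK xs (n+1) bs else x :: pvK xs (n+1) bs

theorem pvBad_bounds : ∀ (l : List String) (n d b : Int), b ∈ pvBad l n d → n ≤ b ∧ b < n + l.length := by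
  intro l
  induction l with
  | nil => intro n d b hb; simp [pvBad] at hb
  | cons x xs ih =>
    intro n d b hb
    simp only [pvBad] at hb
    split at hb
    · split at hb
      · rcases List.mem_cons.mp hb with h | h
        · subst h; simp
        · have := ih (n+1) 0 b h; simp [List.length_cons] at *; omega
      · have := ih (n+1) (d-1) b hb; simp [List.length_cons] at *; omega
    · split at hb
      · have := ih (n+1) (d+1) b hb; simp [List.length_cons] at *; omega
      · have := ih (n+1) d b hb; simp [List.length_cons] at *; omega

theorem pvBad_sorted : ∀ (l : List String) (n d : Int), (pvBad l n d).Pairwise (· < ·) := by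
  intro l
  induction l with
  | nil => intro n d; simp [pvBad]
  | cons x xs ih =>
    intro n d
    simp only [pvBad]
    split
    · split
      · exact List.Pairwise.cons (fun b hb => by have := pvBad_bounds xs (n+1) 0 b hb; omega) (ih (n+1) 0)
      · exact ih (n+1) (d-1)
    · split
      · exact ih (n+1) (d+1)
      · exact ih (n+1) d

-- phase 1 of A computes pvBad (only the length of `opening` matters)
theorem pvPhase1 : ∀ (l : List String) (n : Int) (o b : List Int),
    ((PySem.List.enumerate l n).foldl pvStepA (o, b)).2 = b ++ pvBad l n (o.length : Int) := by
  intro l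
  induction l with
  | nil => intro n o b; simp [PySem.List.enumerate_nil, pvBad]
  | cons x xs ih =>
    intro n o b
    rw [PySem.List.enumerate_cons]
    by_cases hop : x == "("
    · simp only [List.foldl_cons, pvStepA, hop, if_pos]
      rw [ih]
      have hx : x = "(" := by simpa using hop
      have hc : ((o ++ [n]).length : Int) = (o.length : Int) + 1 := by
        simp [List.length_append]
      rw [hc]
      simp [pvBad, hx]
    · by_cases hcl : x == ")"
      · have hx : x = ")" := by simpa using hcl
        by_cases hz : o.length = 0
        · have ho : o = [] := List.length_eq_zero_iff.mp hz
          subst ho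
          simp only [List.foldl_cons, pvStepA, hop, hcl]
          simp only [List.length_nil]
          rw [ih]
          simp only [pvBad, hx, beq_self_eq_true, if_pos, List.length_nil, Nat.cast_zero,
            beq_self_eq_true, if_true]
          have : ¬ ("(" = ")" ) := by decide
          simp [this]
        · simp only [List.foldl_cons, pvStepA, hop, hcl]
          have : (o.length == 0) = false := by simpa using hz
          simp only [this, Bool.false_eq_true, if_false, if_pos, if_true]
          rw [ih]
          have hlen : ((o.dropLast).length : Int) = (o.length : Int) - 1 := by
            rw [List.length_dropLast]; omega
          rw [hlen]
          have hd : (((o.length : Int) - 1) ) = ((o.length - 1 : Nat) : Int) := by omega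
          have hne : ((o.length : Int) == 0) = false := by
            simp only [beq_eq_false_iff_ne, ne_eq]; intro h; apply hz; omega
          simp [pvBad, hx, hne]
      · simp only [List.foldl_cons, pvStepA, hop, hcl, if_neg, Bool.false_eq_true]
        rw [ih]
        have hx1 : x ≠ "(" := by simpa using hop
        have hx2 : x ≠ ")" := by simpa using hcl
        simp [pvBad, hx1, hx2]

-- a stale index below the current position never affects pvK
theorem pvK_drop : ∀ (l : List String) (m b : Int) (bs : List Int), b < m →
    pvK l m (b :: bs) = pvK l m bs := by
  intro l
  induction l with
  | nil => intro m b bs _; simp [pvK]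
  | cons y ys ih =>
    intro m b bs hb
    have hne : ¬ (m = b) := by omega
    by_cases hm : m ∈ bs
    · simp only [pvK, List.mem_cons, hne, false_or, hm, if_pos, if_true]
      exact ih (m+1) b bs (by omega)
    · simp only [pvK, List.mem_cons, hne, false_or, hm, if_neg, not_false_iff, if_false]
      rw [ih (m+1) b bs (by omega)]

-- peel a kept head past the whole pop loop
theorem pvPopCons : ∀ (bs : List Int) (ix : Int) (x : String) (xs : List String),
    bs.Pairwise (· < ·) → (∀ b ∈ bs, ix < b ∧ b < ix + 1 + xs.length) →
    (PySem.List.enumerate bs ix).foldl pvPopStep (x :: xs) =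
      x :: (PySem.List.enumerate bs (ix+1)).foldl pvPopStep xs := by
  intro bs
  induction bs with
  | nil => intro ix x xs _ _; simp [PySem.List.enumerate_nil]
  | cons b bs' ih =>
    intro ix x xs hs hb
    rw [PySem.List.enumerate_cons, PySem.List.enumerate_cons]
    simp only [List.foldl_cons]
    obtain ⟨h1, h2⟩ := hb b (List.mem_cons_self ..)
    obtain ⟨k, hbk⟩ : ∃ k : Nat, b - ix = (k : Int) := ⟨(b - ix).toNat, by omega⟩
    have hk1 : 1 ≤ k := by omega
    have hklt : k < (x :: xs).length := by simp [List.length_cons]; omega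
    have hpop1 : pvPopStep (x :: xs) (ix, b) = x :: xs.eraseIdx (k - 1) := by
      simp only [pvPopStep, hbk]
      rw [PySem.List.pop?_natCast _ _ hklt]
      obtain ⟨k', rfl⟩ : ∃ k', k = k' + 1 := ⟨k - 1, by omega⟩
      simp [List.eraseIdx_cons_succ]
    have hpop2 : pvPopStep xs (ix + 1, b) = xs.eraseIdx (k - 1) := by
      have hbk' : b - (ix + 1) = ((k - 1 : Nat) : Int) := by omega
      have hklt' : k - 1 < xs.length := by simp [List.length_cons] at hklt; omega
      simp only [pvPopStep, hbk']
      rw [PySem.List.pop?_natCast _ _ hklt']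
    rw [hpop1, hpop2]
    have hlen : (xs.eraseIdx (k - 1)).length = xs.length - 1 := by
      rw [List.length_eraseIdx_of_lt (by simp [List.length_cons] at hklt; omega)]
    rw [ih (ix + 1) x (xs.eraseIdx (k - 1)) (List.Pairwise.of_cons hs)
      (by
        intro b' hb'
        have hbb' : b < b' := (List.pairwise_cons.mp hs).1 b' hb'
        have := (hb b' (List.mem_cons_of_mem _ hb')).2
        constructor <;> [omega; (rw [hlen]; simp [List.length_cons] at hklt ⊢; omega)])]

-- the pop loop removes exactly the indices in bs
theorem pvPopLoop : ∀ (l : List String) (bs : List Int) (ix : Int),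
    bs.Pairwise (· < ·) → (∀ b ∈ bs, ix ≤ b ∧ b < ix + l.length) →
    (PySem.List.enumerate bs ix).foldl pvPopStep l = pvK l ix bs := by
  intro l
  induction l with
  | nil =>
    intro bs ix hs hb
    cases bs with
    | nil => simp [PySem.List.enumerate_nil, pvK]
    | cons b bs' =>
      have := hb b (List.mem_cons_self ..)
      simp at this; omega
  | cons x xs ih =>
    intro bs ix hs hb
    by_cases hm : ix ∈ bs
    · cases bs with
      | nil => simp at hm
      | cons b bs' =>
        have hbb : b = ix := by
          rcases List.mem_cons.mp hm with h | h
          · omega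
          · have h1 := (List.pairwise_cons.mp hs).1 ix h
            have h2 := (hb b (List.mem_cons_self ..)).1
            omega
        subst hbb
        rw [PySem.List.enumerate_cons]
        simp only [List.foldl_cons]
        have hpop : pvPopStep (x :: xs) (b, b) = xs := by
          simp [pvPopStep, PySem.List.pop?_zero_cons]
        rw [hpop]
        have hb' : ∀ b' ∈ bs', b + 1 ≤ b' ∧ b' < b + 1 + xs.length := by
          intro b' hbm
          have h1 := (List.pairwise_cons.mp hs).1 b' hbm
          have h2 := (hb b' (List.mem_cons_of_mem _ hbm)).2
          simp [List.length_cons] at h2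
          omega
        rw [ih bs' (b + 1) (List.Pairwise.of_cons hs) hb']
        have hK : pvK (x :: xs) b (b :: bs') = pvK xs (b + 1) bs' := by
          simp only [pvK, List.mem_cons_self, if_pos, if_true]
          exact pvK_drop xs (b+1) b bs' (by omega)
        rw [hK]
    · have hb' : ∀ b ∈ bs, ix < b ∧ b < ix + 1 + xs.length := by
        intro b hbm
        have h := hb b hbm
        have : ix ≠ b := fun he => hm (he ▸ hbm)
        simp [List.length_cons] at h
        constructor <;> omega
      rw [pvPopCons bs ix x xs hs hb']
      rw [ih bs (ix + 1) hs (by intro b hbm; have := hb' b hbm; omega)]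
      simp only [pvK, hm, if_neg, not_false_iff]

-- pvK with the bad list is exactly B's single pass
theorem pvKBad : ∀ (l : List String) (n d : Int), pvK l n (pvBad l n d) = pvGo l d := by
  intro l
  induction l with
  | nil => intro n d; simp [pvBad, pvK, pvGo]
  | cons x xs ih =>
    intro n d
    have hnot : ∀ d' : Int, n ∉ pvBad xs (n+1) d' := by
      intro d' h
      have := pvBad_bounds xs (n+1) d' n h
      omega
    by_cases hcl : x = ")"
    · subst hcl
      by_cases hd : d = 0
      · subst hd
        simp only [pvBad, pvGo, beq_self_eq_true, if_pos, if_true]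
        simp only [pvK, List.mem_cons_self, if_pos, if_true]
        rw [pvK_drop xs (n+1) n _ (by omega)]
        exact ih (n+1) 0
      · have hdb : (d == 0) = false := by simpa using hd
        simp only [pvBad, pvGo, beq_self_eq_true, if_pos, hdb, Bool.false_eq_true, if_false,
          if_true]
        simp only [pvK, hnot (d-1), if_neg, not_false_iff, if_false]
        rw [ih (n+1) (d-1)]
    · have hclb : (x == ")") = false := by simpa using hcl
      by_cases hop : x = "("
      · subst hop
        simp only [pvBad, pvGo, hclb, Bool.false_eq_true, if_false, beq_self_eq_true, if_pos,
          if_true]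
        simp only [pvK, hnot (d+1), if_neg, not_false_iff, if_false]
        rw [ih (n+1) (d+1)]
      · have hopb : (x == "(") = false := by simpa using hop
        simp only [pvBad, pvGo, hclb, hopb, Bool.false_eq_true, if_false]
        simp only [pvK, hnot d, if_neg, not_false_iff, if_false]
        rw [ih (n+1) d]

theorem orphanremover_eq (l : List String) : orphanremover l = orphanremover_alt l := by
  unfold orphanremover orphanremover_alt
  have h1 : ((PySem.List.enumerate l 0).foldl pvStepA ([], [])).2 = pvBad l 0 0 := by
    have := pvPhase1 l 0 [] []
    simpa using this
  simp only [h1]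
  rw [pvPopLoop l (pvBad l 0 0) 0 (pvBad_sorted l 0 0) (fun b hb => pvBad_bounds l 0 0 b hb)]
  exact pvKBad l 0 0

-- ===== VERDICT (by name: the statement is the Claim_ definition above) =====
theorem orphanremover_spec : Claim_equal_orphanremover := by
  intro l _
  unfold Spec_orphanremover
  exact orphanremover_eq l
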